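-- pv_equiv track=rewrite | github.com/Vivekagent47/HackerRank | Problem Solving/9.py | birthdayCakeCandles1
-- ===== SOURCE A (Python) =====
-- def birthdayCakeCandles1(candles):
--     count = 1
--     tallest = candles[0]
--     for i in range(1,len(candles)):
--         if tallest == candles[i]:
--             count += 1
--         if tallest < candles[i]:
--             count = 1
--             tallest = candles[i]
--     return count
-- ===== SOURCE B (Python) =====
-- def birthdayCakeCandles1(candles):
--     return candles.count(max(candles))
-- ===== Notes on version B (the rewrite author's own statement) =====
-- stated objective: idiomatic
-- what changed: Replaces the hand-written running-max loop with the standard two-pass max(candles) then candles.count(max).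
import Mathlib
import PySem

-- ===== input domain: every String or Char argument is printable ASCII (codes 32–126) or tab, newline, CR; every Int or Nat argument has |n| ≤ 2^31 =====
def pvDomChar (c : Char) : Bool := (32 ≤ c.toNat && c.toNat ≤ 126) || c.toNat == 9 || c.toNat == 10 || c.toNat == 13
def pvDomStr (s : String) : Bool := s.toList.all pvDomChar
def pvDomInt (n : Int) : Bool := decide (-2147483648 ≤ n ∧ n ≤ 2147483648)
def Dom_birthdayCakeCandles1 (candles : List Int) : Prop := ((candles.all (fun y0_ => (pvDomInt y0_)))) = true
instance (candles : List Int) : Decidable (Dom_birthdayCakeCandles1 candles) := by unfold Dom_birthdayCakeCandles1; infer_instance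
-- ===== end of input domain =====

-- B replaces A's single running-max loop with the idiomatic two-pass max-then-count; on the empty list both programs raise (excluded by Pre_).


-- ===== PORT A =====
-- A's loop body: 'if tallest == candles[i]: count += 1' then 'if tallest < candles[i]: count = 1; tallest = candles[i]'
def pvStep (s : Int × Int) (x : Int) : Int × Int :=
  let s := if s.2 = x then (s.1 + 1, s.2) else s
  if s.2 < x then ((1 : Int), x) else s

def birthdayCakeCandles1 (candles : List Int) : Int :=
  ((PySem.List.pyRange 1 candles.length 1).foldl
    (fun s i => pvStep s (PySem.List.pyGetD candles i 0))
    (1, PySem.List.pyGetD candles 0 0)).1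

-- ===== PORT B =====
def birthdayCakeCandles1_alt (candles : List Int) : Int :=
  match PySem.List.max? candles (fun y => y) with
  | some m => (PySem.List.count candles m : Int)
  | none => 0    -- unreachable under Pre_: Python's max raises on []

-- ===== PRECONDITION & SPEC =====
-- Pre_ excludes only the empty list, on which both programs raise (A: IndexError, B: ValueError).
def Pre_birthdayCakeCandles1 (candles : List Int) : Prop := candles ≠ []
instance (candles : List Int) : Decidable (Pre_birthdayCakeCandles1 candles) := by unfold Pre_birthdayCakeCandles1; infer_instance
def pvWitness_birthdayCakeCandles1 : List Int := [3, 2, 1, 3]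

def Spec_birthdayCakeCandles1 (candles : List Int) (out : Int) : Prop := out = birthdayCakeCandles1_alt candles
instance (candles : List Int) (out : Int) : Decidable (Spec_birthdayCakeCandles1 candles out) := by unfold Spec_birthdayCakeCandles1; infer_instance

-- ===== CLAIM (what is proved, stated in full; the proofs are below) =====
def Claim_equal_birthdayCakeCandles1 : Prop := ∀ (candles : List Int), Dom_birthdayCakeCandles1 candles → Pre_birthdayCakeCandles1 candles → Spec_birthdayCakeCandles1 candles (birthdayCakeCandles1 candles)

-- ===== LEMMAS AND PROOFS =====

-- Invariant of A's loop: the final tallest is the running max, and the count is the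
-- count of that max in the processed suffix (continued from c while the max stays t).
theorem pvLoop (l : List Int) (t c : Int) :
    l.foldl pvStep (c, t) =
      (if l.foldl max t = t then c + (l.count t : Int) else (l.count (l.foldl max t) : Int),
       l.foldl max t) := by
  induction l generalizing t c with
  | nil => simp
  | cons x l ih =>
    have hle : t ≤ l.foldl max t := (PySem.List.le_foldl_max l t).1
    simp only [List.foldl_cons]
    rcases lt_trichotomy t x with hlt | heq | hgt
    · have hstep : pvStep (c, t) x = (1, x) := by
        simp [pvStep, ne_of_lt hlt, hlt]
      rw [hstep, ih, max_eq_right hlt.le]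
      have hle' : x ≤ l.foldl max x := (PySem.List.le_foldl_max l x).1
      have hMt : l.foldl max x ≠ t := by omega
      rcases eq_or_ne (l.foldl max x) x with h | h
      · rw [h]
        simp [List.count_cons]
        omega
      · simp [h, hMt, List.count_cons]
        omega
    · subst heq
      have hstep : pvStep (c, t) t = (c + 1, t) := by simp [pvStep]
      rw [hstep, ih, max_self]
      rcases eq_or_ne (l.foldl max t) t with h | h
      · simp [h]
        omega
      · have hc : List.count (l.foldl max t) (t :: l) = List.count (l.foldl max t) l := by
          simp [Ne.symm h]
        simp [h, hc]
    · have hstep : pvStep (c, t) x = (c, t) := by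
        simp [pvStep, (ne_of_lt hgt).symm, not_lt_of_gt hgt]
      rw [hstep, ih, max_eq_left hgt.le]
      have hMx : l.foldl max t ≠ x := by omega
      rcases eq_or_ne (l.foldl max t) t with h | h
      · simp [h, List.count_cons]
        omega
      · simp [h, List.count_cons]
        omega

-- ===== VERDICT (by name: the statement is the Claim_ definition above) =====
theorem birthdayCakeCandles1_spec : Claim_equal_birthdayCakeCandles1 := by
  intro candles _ hpre
  unfold Spec_birthdayCakeCandles1
  obtain ⟨x, l, rfl⟩ := List.exists_cons_of_ne_nil hpre
  unfold birthdayCakeCandles1 birthdayCakeCandles1_alt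
  rw [PySem.List.max?_id_cons]
  rw [PySem.List.foldl_pyRange_pyGetD' (xs := x :: l) (a := 1) (d := 0)
      (f := pvStep) (init := ((1 : Int), PySem.List.pyGetD (x :: l) 0 0)) (by omega)]
  simp only [PySem.List.pyGetD_zero_cons]
  rw [pvLoop]
  simp only [PySem.List.count_eq]
  have hle := (PySem.List.le_foldl_max l x).1
  rcases eq_or_ne (l.foldl max x) x with h | h
  · simp [h]
    omega
  · simp [h, List.count_cons]
    omega
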